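-- pv_equiv track=rewrite | github.com/miikka/scratch | omnifocus-done/omnifocus_completed_today.py | parse_applescript_output
-- ===== SOURCE A (Python) =====
-- def parse_applescript_output(output):
--     """Parse the AppleScript output into a list of tasks."""
--     if not output.strip():
--         return []
--
--     tasks = []
--     # AppleScript returns a list format like: taskName:Task 1, taskNote:Note 1, taskProject:Project 1, taskName:Task 2, taskNote:Note 2, taskProject:Project 2
--     # We need to parse this format
--     lines = output.strip().split(', ')
--
--     current_task = {}
--     for line in lines:
--         if 'taskName:' in line:
--             if current_task:
--                 tasks.append(current_task)
--             task_name = line.split('taskName:', 1)[1]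
--             current_task = {'name': task_name, 'note': '', 'project': ''}
--         elif 'taskNote:' in line and current_task:
--             task_note = line.split('taskNote:', 1)[1]
--             current_task['note'] = task_note
--         elif 'taskProject:' in line and current_task:
--             task_project = line.split('taskProject:', 1)[1]
--             current_task['project'] = task_project
--
--     if current_task:
--         tasks.append(current_task)
--
--     return tasks
-- ===== SOURCE B (Python) =====
-- def _task(head, body):
--     """Build one task dict from a record-group: head names it, body fills note/project."""
--     note = project = ''
--     for tok in body:
--         if 'taskNote:' in tok:
--             note = tok.split('taskNote:', 1)[1]
--         elif 'taskProject:' in tok: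
--             project = tok.split('taskProject:', 1)[1]
--     return {'name': head.split('taskName:', 1)[1], 'note': note, 'project': project}
--
--
-- def _records(tokens):
--     """Recursively cut the token list into (head, body) records at taskName tokens."""
--     while tokens and 'taskName:' not in tokens[0]:
--         tokens = tokens[1:]
--     if not tokens:
--         return []
--     head, rest = tokens[0], tokens[1:]
--     i = 0
--     while i < len(rest) and 'taskName:' not in rest[i]:
--         i += 1
--     return [_task(head, rest[:i])] + _records(rest[i:])
--
--
-- def parse_applescript_output(output):
--     """Parse the AppleScript output into a list of tasks."""
--     return _records(output.strip().split(', '))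
-- ===== Notes on version B (the rewrite author's own statement) =====
-- stated objective: simpler
-- what changed: A's single stateful scan with an open current-task dict is replaced by a two-phase decomposition: recursively cut the token list into record-groups at name-marker tokens (discarding leading non-name tokens), then build each task dict from its group's head and body; the empty-input guard disappears because an empty token list yields no groups.
import Mathlib
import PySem

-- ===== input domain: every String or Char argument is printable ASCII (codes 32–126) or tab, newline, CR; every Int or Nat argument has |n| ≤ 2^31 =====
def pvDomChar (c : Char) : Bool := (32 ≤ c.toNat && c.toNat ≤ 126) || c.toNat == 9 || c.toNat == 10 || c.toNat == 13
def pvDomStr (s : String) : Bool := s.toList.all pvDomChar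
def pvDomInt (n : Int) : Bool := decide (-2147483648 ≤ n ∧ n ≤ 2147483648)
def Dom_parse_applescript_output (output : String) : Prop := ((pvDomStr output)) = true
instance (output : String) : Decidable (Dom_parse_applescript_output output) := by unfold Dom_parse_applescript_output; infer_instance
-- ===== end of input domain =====

-- B re-decomposes A's single stateful scan into record-grouping plus a per-record pass (objective: simpler; same O(n) cost).

-- ===== PORT A =====
-- line.split(sep, 1)[1] for a line that contains sep
def pvAfter (line sep : String) : String :=
  ((PySem.Str.splitMax? line sep 1).getD []).getD 1 ""

-- loop body of A's 'for line in lines': state = (tasks, current_task)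
def pvStepA (st : List (List (String × String)) × PySem.Dict String String) (line : String) :
    List (List (String × String)) × PySem.Dict String String :=
  if PySem.Str.isIn "taskName:" line then
    let tasks := if st.2.items ≠ [] then st.1 ++ [st.2.items] else st.1
    (tasks, PySem.Dict.mk [("name", pvAfter line "taskName:"), ("note", ""), ("project", "")])
  else if PySem.Str.isIn "taskNote:" line && !st.2.items.isEmpty then
    (st.1, st.2.insert "note" (pvAfter line "taskNote:"))
  else if PySem.Str.isIn "taskProject:" line && !st.2.items.isEmpty then
    (st.1, st.2.insert "project" (pvAfter line "taskProject:"))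
  else st

def parse_applescript_output (output : String) : List (List (String × String)) :=
  if PySem.Str.strip output = "" then []
  else
    let lines := (PySem.Str.splitMax? (PySem.Str.strip output) ", " (-1)).getD []
    let st := lines.foldl pvStepA ([], PySem.Dict.empty)
    if st.2.items ≠ [] then st.1 ++ [st.2.items] else st.1

-- ===== PORT B =====
def pvIsName (tok : String) : Bool := PySem.Str.isIn "taskName:" tok

-- loop body of _task's 'for tok in body'
def pvStepNP (np : String × String) (tok : String) : String × String :=
  if PySem.Str.isIn "taskNote:" tok then (pvAfter tok "taskNote:", np.2)
  else if PySem.Str.isIn "taskProject:" tok then (np.1, pvAfter tok "taskProject:")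
  else np

def pvTask (head : String) (body : List String) : List (String × String) :=
  let np := body.foldl pvStepNP ("", "")
  [("name", pvAfter head "taskName:"), ("note", np.1), ("project", np.2)]

def pvRecords : List String → List (List (String × String))
  | [] => []
  | tok :: rest =>
    if pvIsName tok then
      pvTask tok (rest.takeWhile (fun t => !pvIsName t)) ::
        pvRecords (rest.dropWhile (fun t => !pvIsName t))
    else
      pvRecords rest
termination_by tokens => tokens.length
decreasing_by
  · exact Nat.lt_succ_of_le (List.length_dropWhile_le _ _)
  · exact Nat.lt_succ_of_le (Nat.le_refl _)

def parse_applescript_output_alt (output : String) : List (List (String × String)) :=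
  pvRecords ((PySem.Str.splitMax? (PySem.Str.strip output) ", " (-1)).getD [])

-- ===== PRECONDITION & SPEC =====
def Spec_parse_applescript_output (output : String) (out : List (List (String × String))) : Prop := out = parse_applescript_output_alt output
instance (output : String) (out : List (List (String × String))) : Decidable (Spec_parse_applescript_output output out) := by unfold Spec_parse_applescript_output; infer_instance

-- ===== CLAIM (what is proved, stated in full; the proofs are below) =====
def Claim_equal_parse_applescript_output : Prop := ∀ (output : String), Dom_parse_applescript_output output → Spec_parse_applescript_output output (parse_applescript_output output)

-- ===== LEMMAS AND PROOFS =====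

-- the current_task dict A carries is always of this shape once non-empty
def pvMk (n no p : String) : PySem.Dict String String :=
  PySem.Dict.mk [("name", n), ("note", no), ("project", p)]

lemma pvMk_items (n no p : String) : (pvMk n no p).items = [("name", n), ("note", no), ("project", p)] := rfl

def pvFinish (st : List (List (String × String)) × PySem.Dict String String) :
    List (List (String × String)) :=
  if st.2.items ≠ [] then st.1 ++ [st.2.items] else st.1

-- invariant for A's loop while a task is open: the tail of the loop equals
-- B's body fold over the tokens up to the next name, then B's remaining records
lemma pvLoop_open (tokens : List String) :
    ∀ (tasks : List (List (String × String))) (n no p : String),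
    pvFinish (tokens.foldl pvStepA (tasks, pvMk n no p)) =
      tasks ++ ((fun np => [("name", n), ("note", np.1), ("project", np.2)])
                  ((tokens.takeWhile (fun t => !pvIsName t)).foldl pvStepNP (no, p)) ::
        pvRecords (tokens.dropWhile (fun t => !pvIsName t))) := by
  induction tokens with
  | nil =>
    intro tasks n no p
    simp [pvFinish, pvRecords, pvMk_items]
  | cons tok rest ih =>
    intro tasks n no p
    by_cases hname : pvIsName tok = true
    · rw [List.foldl_cons]
      have hstep : pvStepA (tasks, pvMk n no p) tok =
          (tasks ++ [(pvMk n no p).items], pvMk (pvAfter tok "taskName:") "" "") := by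
        simp [pvIsName] at hname
        simp [pvStepA, hname, pvMk]
      rw [hstep, ih]
      simp [pvRecords, hname, pvTask, pvMk_items]
    · replace hname : pvIsName tok = false := by simpa using hname
      have htake : (tok :: rest).takeWhile (fun t => !pvIsName t) =
          tok :: rest.takeWhile (fun t => !pvIsName t) := by simp [hname]
      have hdrop : (tok :: rest).dropWhile (fun t => !pvIsName t) =
          rest.dropWhile (fun t => !pvIsName t) := by simp [hname]
      simp [pvIsName] at hname
      rw [htake, hdrop, List.foldl_cons, List.foldl_cons]
      by_cases hnote : PySem.Str.isIn "taskNote:" tok = true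
      all_goals simp at hnote
      · have hstep : pvStepA (tasks, pvMk n no p) tok =
            (tasks, pvMk n (pvAfter tok "taskNote:") p) := by
          simp [pvStepA, hname, hnote, pvMk, PySem.Dict.insert, PySem.Dict.contains]
        rw [hstep, ih]
        simp [pvStepNP, hnote]
      · by_cases hproj : PySem.Str.isIn "taskProject:" tok = true
        all_goals simp at hproj
        · have hstep : pvStepA (tasks, pvMk n no p) tok =
              (tasks, pvMk n no (pvAfter tok "taskProject:")) := by
            simp [pvStepA, hname, hnote, hproj, pvMk, PySem.Dict.insert, PySem.Dict.contains]
          rw [hstep, ih]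
          simp [pvStepNP, hnote, hproj]
        · have hstep : pvStepA (tasks, pvMk n no p) tok = (tasks, pvMk n no p) := by
            simp [pvStepA, hname, hnote, hproj]
          rw [hstep, ih]
          simp [pvStepNP, hnote, hproj]

-- before the first name token A's state stays (tasks, {}) and B skips the token
lemma pvLoop_empty (tokens : List String) (tasks : List (List (String × String))) :
    pvFinish (tokens.foldl pvStepA (tasks, PySem.Dict.empty)) = tasks ++ pvRecords tokens := by
  induction tokens generalizing tasks with
  | nil => simp [pvFinish, pvRecords, PySem.Dict.empty]
  | cons tok rest ih =>
    by_cases hname : pvIsName tok = true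
    · rw [List.foldl_cons]
      have hb := hname
      simp [pvIsName] at hb
      have hstep : pvStepA (tasks, PySem.Dict.empty) tok =
          (tasks, pvMk (pvAfter tok "taskName:") "" "") := by
        simp [pvStepA, hb, PySem.Dict.empty, pvMk]
      rw [hstep, pvLoop_open]
      simp [pvRecords, hname, pvTask]
    · replace hname : pvIsName tok = false := by simpa using hname
      have hb := hname
      simp [pvIsName] at hb
      have hstep : pvStepA (tasks, PySem.Dict.empty) tok = (tasks, PySem.Dict.empty) := by
        simp [pvStepA, hb, PySem.Dict.empty]
      rw [List.foldl_cons, hstep, ih]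
      simp [pvRecords, hname]

-- on blank input both sides give []
lemma pvRecords_blank : pvRecords [""] = [] := by
  have h : pvIsName "" = false := by decide
  simp [pvRecords, h]

-- ===== VERDICT (by name: the statement is the Claim_ definition above) =====
theorem parse_applescript_output_spec : Claim_equal_parse_applescript_output := by
  intro output _
  unfold Spec_parse_applescript_output parse_applescript_output parse_applescript_output_alt
  by_cases h : PySem.Str.strip output = ""
  · rw [if_pos h, h]
    have : (PySem.Str.splitMax? "" ", " (-1)).getD [] = [""] := by decide
    rw [this, pvRecords_blank]
  · rw [if_neg h]
    exact pvLoop_empty _ []
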